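-- pv_equiv track=rewrite | github.com/Ryerzs/AOC-2025 | Day-2/Stars.py | star1_alt3
-- ===== SOURCE A (Python) =====
-- def star1_alt3(data: list[(int,int)]) -> int:
--     # --------------- Simpler possible_repeating_divisors() ---------------
--     repeating_divisors:dict[int:list[int]] =  {}
--     repeating_divisors:dict[int:list[int]] =  {}
--     for i in range(1,11): # Biggest number is 10 digits
--         repeating_divisors[i] = [] # Need to create for 1, some ints are length 1
--     repeating_divisors[2].append(int('1'*2))
--     repeating_divisors[4].append(int('01'*2))
--     repeating_divisors[6].append(int('001'*2))
--     repeating_divisors[8].append(int('0001'*2))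
--     repeating_divisors[10].append(int('00001'*2))
--
--     #----------------------------------------------------------------------
--     # --------------------- Simpler all_invalid_ids() ---------------------
--     invalid_ids = set()
--     for length, divisors in repeating_divisors.items():
--         for divisor in divisors:
--             exponent = length-len(str(divisor))
--             for i in range(10**(exponent), 10**(exponent+1)):
--                 invalid_ids.add(i*divisor)
--     #----------------------------------------------------------------------
--
--     count:int = 0
--     for start,end in data:
--         count += sum([cur_id for cur_id in invalid_ids if cur_id >= start and cur_id <= end])
--     return count
-- ===== SOURCE B (Python) =====
-- def star1_alt3(data: list[(int,int)]) -> int: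
--     # Closed-form: invalid ids are i*d for (d, lo) in the table below and lo <= i < 10*lo.
--     # f(x) = sum of all invalid ids <= x, via the arithmetic-series formula per block.
--     blocks = ((11, 1), (101, 10), (1001, 100), (10001, 1000), (100001, 10000))
--
--     def f(x):
--         total = 0
--         for d, lo in blocks:
--             hi = 10 * lo - 1
--             m = min(hi, x // d)
--             if lo <= m:
--                 total += d * (lo + m) * (m - lo + 1) // 2
--         return total
--
--     count = 0
--     for start, end in data:
--         if start <= end:
--             count += f(end) - f(start - 1)
--     return count
-- ===== Notes on version B (the rewrite author's own statement) =====
-- stated objective: faster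
-- what changed: B drops A's materialisation of all 99999 invalid ids as a set and the per-query scan over it, and instead answers each query in O(1) with a closed-form prefix function f(x) = sum of invalid ids <= x, computed per divisor block by the arithmetic-series formula; the query value is f(end)-f(start-1).
import Mathlib
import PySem

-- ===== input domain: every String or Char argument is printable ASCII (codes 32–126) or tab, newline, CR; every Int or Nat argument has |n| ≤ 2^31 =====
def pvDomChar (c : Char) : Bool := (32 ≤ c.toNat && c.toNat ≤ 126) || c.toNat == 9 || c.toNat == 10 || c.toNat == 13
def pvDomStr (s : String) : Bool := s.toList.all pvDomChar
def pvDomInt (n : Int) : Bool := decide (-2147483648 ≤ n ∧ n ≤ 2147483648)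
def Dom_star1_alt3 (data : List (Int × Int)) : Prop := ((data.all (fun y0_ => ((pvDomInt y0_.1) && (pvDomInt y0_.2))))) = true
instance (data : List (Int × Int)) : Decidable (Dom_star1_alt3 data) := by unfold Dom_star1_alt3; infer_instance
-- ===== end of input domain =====

-- B replaces A's 99999-element invalid-id set and per-query scan by a closed-form
-- prefix sum f(x) per divisor block; objective: faster (O(N*Q) -> O(Q)).

-- ===== PORT A =====
-- 10**n for the nonnegative exponents A computes (exact for n ≥ 0)
def pow10 (n : Int) : Int := 10 ^ n.toNat

-- repeating_divisors: {} ; for i in range(1,11): rd[i] = [] ; then the five appends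
-- (the constants int('1'*2)=11, int('01'*2)=101, … are written as their values)
def pvA_repeatingDivisors : PySem.Dict Int (List Int) :=
  let rd := (PySem.List.pyRange 1 11 1).foldl (fun d i => d.insert i []) PySem.Dict.empty
  let rd := rd.modify 2 [] (fun l => l ++ [11])
  let rd := rd.modify 4 [] (fun l => l ++ [101])
  let rd := rd.modify 6 [] (fun l => l ++ [1001])
  let rd := rd.modify 8 [] (fun l => l ++ [10001])
  rd.modify 10 [] (fun l => l ++ [100001])

-- one dict entry of the invalid_ids loop: for divisor in divisors:
--   exponent = length - len(str(divisor)); for i in range(10**exponent, 10**(exponent+1)): s.add(i*divisor)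
-- Python's set is modelled by Std.HashSet (CPython's set is a hash table; PySem.Set's
-- list model cannot evaluate 99999 inserts); the set is consumed only by an
-- order-independent sum, so the hash order is never observed.
def pvA_step (s : Std.HashSet Int) (kv : Int × List Int) : Std.HashSet Int :=
  kv.2.foldl (fun s divisor =>
    (PySem.List.pyRange (pow10 (kv.1 - PySem.Str.len (PySem.Int.toStr divisor)))
        (pow10 (kv.1 - PySem.Str.len (PySem.Int.toStr divisor) + 1)) 1).foldl
      (fun s i => s.insert (i * divisor)) s) s

-- invalid_ids = set(); for length, divisors in rd.items(): …
def pvA_invalidIds : Std.HashSet Int :=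
  pvA_repeatingDivisors.items.foldl pvA_step ∅

-- count += sum([cur_id for cur_id in invalid_ids if cur_id >= start and cur_id <= end])
def star1_alt3 (data : List (Int × Int)) : Int :=
  data.foldl (fun count se =>
    count + (pvA_invalidIds.toList.filter (fun v => decide (se.1 ≤ v) && decide (v ≤ se.2))).sum) 0

-- ===== PORT B =====
-- f(x): sum of all invalid ids ≤ x, one arithmetic-series term per (divisor, lo) block
def pvB_f (x : Int) : Int :=
  [((11 : Int), (1 : Int)), (101, 10), (1001, 100), (10001, 1000), (100001, 10000)].foldl
    (fun total dl =>
      let hi := 10 * dl.2 - 1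
      let m := min hi (PySem.Int.floordiv x dl.1)
      if dl.2 ≤ m then total + PySem.Int.floordiv (dl.1 * (dl.2 + m) * (m - dl.2 + 1)) 2
      else total) 0

def star1_alt3_alt (data : List (Int × Int)) : Int :=
  data.foldl (fun count se =>
    if se.1 ≤ se.2 then count + (pvB_f se.2 - pvB_f (se.1 - 1)) else count) 0

-- ===== PRECONDITION & SPEC =====
def Spec_star1_alt3 (data : List (Int × Int)) (out : Int) : Prop := out = star1_alt3_alt data
instance (data : List (Int × Int)) (out : Int) : Decidable (Spec_star1_alt3 data out) := by unfold Spec_star1_alt3; infer_instance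

-- ===== CLAIM (what is proved, stated in full; the proofs are below) =====
def Claim_equal_star1_alt3 : Prop := ∀ (data : List (Int × Int)), Dom_star1_alt3 data → Spec_star1_alt3 data (star1_alt3 data)

-- ===== LEMMAS AND PROOFS =====

-- one block of invalid ids: {i*d : a ≤ i < b}
def blk (d a b : Int) : List Int := (PySem.List.pyRange a b 1).map (fun i => i * d)

def pvL : List Int :=
  blk 11 1 10 ++ blk 101 10 100 ++ blk 1001 100 1000 ++ blk 10001 1000 10000 ++
    blk 100001 10000 100000

lemma blk_nodup (d a b : Int) (hd : 0 < d) : (blk d a b).Nodup := by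
  refine (PySem.List.nodup_pyRange_one a b).map ?_
  intro i j h
  exact mul_right_cancel₀ (ne_of_gt hd) h

lemma blk_bounds {d a b x : Int} (hd : 0 < d) (hx : x ∈ blk d a b) :
    a * d ≤ x ∧ x ≤ (b - 1) * d := by
  rcases List.mem_map.mp hx with ⟨i, hi, rfl⟩
  rcases (PySem.List.mem_pyRange_one).mp hi with ⟨h1, h2⟩
  constructor
  · exact mul_le_mul_of_nonneg_right h1 hd.le
  · exact mul_le_mul_of_nonneg_right (by omega) hd.le

lemma pvL_nodup : pvL.Nodup := by
  have n1 := blk_nodup 11 1 10 (by norm_num)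
  have n2 := blk_nodup 101 10 100 (by norm_num)
  have n3 := blk_nodup 1001 100 1000 (by norm_num)
  have n4 := blk_nodup 10001 1000 10000 (by norm_num)
  have n5 := blk_nodup 100001 10000 100000 (by norm_num)
  have d45 : (blk 10001 1000 10000 ++ blk 100001 10000 100000).Nodup := by
    refine n4.append n5 (List.disjoint_left.mpr ?_)
    intro x h4 h5
    have := (blk_bounds (by norm_num : (0:Int) < 10001) h4).2
    have := (blk_bounds (by norm_num : (0:Int) < 100001) h5).1
    omega
  have d345 : (blk 1001 100 1000 ++ (blk 10001 1000 10000 ++ blk 100001 10000 100000)).Nodup := by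
    refine n3.append d45 (List.disjoint_left.mpr ?_)
    intro x h3 h45
    have := (blk_bounds (by norm_num : (0:Int) < 1001) h3).2
    rcases List.mem_append.mp h45 with h | h
    · have := (blk_bounds (by norm_num : (0:Int) < 10001) h).1; omega
    · have := (blk_bounds (by norm_num : (0:Int) < 100001) h).1; omega
  have d2345 : (blk 101 10 100 ++ (blk 1001 100 1000 ++ (blk 10001 1000 10000 ++
      blk 100001 10000 100000))).Nodup := by
    refine n2.append d345 (List.disjoint_left.mpr ?_)
    intro x h2 hrest
    have := (blk_bounds (by norm_num : (0:Int) < 101) h2).2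
    rcases List.mem_append.mp hrest with h | h
    · have := (blk_bounds (by norm_num : (0:Int) < 1001) h).1; omega
    rcases List.mem_append.mp h with h | h
    · have := (blk_bounds (by norm_num : (0:Int) < 10001) h).1; omega
    · have := (blk_bounds (by norm_num : (0:Int) < 100001) h).1; omega
  have : pvL.Nodup := by
    simp only [pvL, List.append_assoc]
    refine n1.append d2345 (List.disjoint_left.mpr ?_)
    intro x h1 hrest
    have := (blk_bounds (by norm_num : (0:Int) < 11) h1).2
    rcases List.mem_append.mp hrest with h | h
    · have := (blk_bounds (by norm_num : (0:Int) < 101) h).1; omega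
    rcases List.mem_append.mp h with h | h
    · have := (blk_bounds (by norm_num : (0:Int) < 1001) h).1; omega
    rcases List.mem_append.mp h with h | h
    · have := (blk_bounds (by norm_num : (0:Int) < 10001) h).1; omega
    · have := (blk_bounds (by norm_num : (0:Int) < 100001) h).1; omega
  exact this

lemma mem_foldl_insert (g : Int → Int) (l : List Int) (s : Std.HashSet Int) (x : Int) :
    x ∈ l.foldl (fun s i => s.insert (g i)) s ↔ x ∈ s ∨ ∃ i ∈ l, x = g i := by
  induction l generalizing s with
  | nil => simp
  | cons hd tl ih =>
    rw [List.foldl_cons, ih]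
    simp only [Std.HashSet.mem_insert, beq_iff_eq, List.mem_cons]
    constructor
    · rintro ((h | h) | ⟨i, hi, rfl⟩)
      · exact Or.inr ⟨hd, Or.inl rfl, h.symm⟩
      · exact Or.inl h
      · exact Or.inr ⟨i, Or.inr hi, rfl⟩
    · rintro (h | ⟨i, hi | hi, rfl⟩)
      · exact Or.inl (Or.inr h)
      · exact Or.inl (Or.inl (by rw [hi]))
      · exact Or.inr ⟨i, hi, rfl⟩

lemma pvA_step_empty (s : Std.HashSet Int) (k : Int) : pvA_step s (k, []) = s := rfl

lemma mem_step_block (k d a b : Int)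
    (e1 : pow10 (k - PySem.Str.len (PySem.Int.toStr d)) = a)
    (e2 : pow10 (k - PySem.Str.len (PySem.Int.toStr d) + 1) = b)
    (s : Std.HashSet Int) (x : Int) :
    x ∈ pvA_step s (k, [d]) ↔ x ∈ s ∨ x ∈ blk d a b := by
  show x ∈ (PySem.List.pyRange (pow10 (k - PySem.Str.len (PySem.Int.toStr d)))
      (pow10 (k - PySem.Str.len (PySem.Int.toStr d) + 1)) 1).foldl
      (fun s i => s.insert (i * d)) s ↔ x ∈ s ∨ x ∈ blk d a b
  rw [e1, e2, mem_foldl_insert]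
  simp only [blk, List.mem_map]
  constructor
  · rintro (h | ⟨i, hi, rfl⟩)
    · exact Or.inl h
    · exact Or.inr ⟨i, hi, rfl⟩
  · rintro (h | ⟨i, hi, rfl⟩)
    · exact Or.inl h
    · exact Or.inr ⟨i, hi, rfl⟩

lemma mem_invalid (x : Int) : x ∈ pvA_invalidIds ↔ x ∈ pvL := by
  have hitems : pvA_repeatingDivisors.items =
      [(1, ([] : List Int)), (2, [11]), (3, []), (4, [101]), (5, []), (6, [1001]),
       (7, []), (8, [10001]), (9, []), (10, [100001])] := by decide
  have M2 := mem_step_block 2 11 1 10 (by decide) (by decide)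
  have M4 := mem_step_block 4 101 10 100 (by decide) (by decide)
  have M6 := mem_step_block 6 1001 100 1000 (by decide) (by decide)
  have M8 := mem_step_block 8 10001 1000 10000 (by decide) (by decide)
  have M10 := mem_step_block 10 100001 10000 100000 (by decide) (by decide)
  unfold pvA_invalidIds
  rw [hitems]
  rw [List.foldl_cons, List.foldl_cons, List.foldl_cons, List.foldl_cons, List.foldl_cons,
      List.foldl_cons, List.foldl_cons, List.foldl_cons, List.foldl_cons, List.foldl_cons,
      List.foldl_nil]
  rw [pvA_step_empty (∅ : Std.HashSet Int) 1]
  rw [pvA_step_empty (pvA_step ∅ (2, [11])) 3]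
  rw [pvA_step_empty (pvA_step (pvA_step ∅ (2, [11])) (4, [101])) 5]
  rw [pvA_step_empty (pvA_step (pvA_step (pvA_step ∅ (2, [11])) (4, [101])) (6, [1001])) 7]
  rw [pvA_step_empty (pvA_step (pvA_step (pvA_step (pvA_step ∅ (2, [11])) (4, [101]))
      (6, [1001])) (8, [10001])) 9]
  rw [M10, M8, M6, M4, M2]
  simp only [Std.HashSet.not_mem_empty, false_or, pvL, List.mem_append, List.append_assoc,
    or_assoc]

lemma invalid_toList_perm : pvA_invalidIds.toList.Perm pvL := by
  have hnd : pvA_invalidIds.toList.Nodup := by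
    have h := Std.HashSet.distinct_toList (m := pvA_invalidIds)
    refine h.imp ?_
    intro a b hab hEq
    rw [hEq] at hab
    simp at hab
  refine (List.perm_ext_iff_of_nodup hnd pvL_nodup).mpr ?_
  intro a
  rw [Std.HashSet.mem_toList, mem_invalid]

lemma invalid_filter_sum (p : Int → Bool) :
    (pvA_invalidIds.toList.filter p).sum = (pvL.filter p).sum :=
  (invalid_toList_perm.filter p).sum_eq

-- indicator sum: Σ_{v ∈ l, v ≤ x} v
def isum (x : Int) (l : List Int) : Int := (l.map (fun v => if v ≤ x then v else 0)).sum

lemma isum_append (x : Int) (l1 l2 : List Int) :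
    isum x (l1 ++ l2) = isum x l1 + isum x l2 := by
  simp [isum]

lemma two_mul_isum_block (d x : Int) (hd : 0 < d) :
    ∀ (n : Nat) (a b : Int), (b - a).toNat = n →
    2 * isum x ((PySem.List.pyRange a b 1).map (fun i => i * d)) =
      if a ≤ min (b - 1) (PySem.Int.floordiv x d) then
        d * (a + min (b - 1) (PySem.Int.floordiv x d)) *
          (min (b - 1) (PySem.Int.floordiv x d) - a + 1)
      else 0 := by
  intro n
  induction n with
  | zero =>
    intro a b h
    rw [PySem.List.pyRange_one_eq_nil (by omega)]
    have hmin : min (b - 1) (PySem.Int.floordiv x d) ≤ b - 1 := min_le_left _ _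
    rw [if_neg (by omega)]
    simp [isum]
  | succ n ih =>
    intro a b h
    have hab : a < b := by omega
    rw [PySem.List.pyRange_one_cons hab]
    have IH := ih (a + 1) b (by omega)
    simp only [List.map_cons, isum, List.sum_cons] at IH ⊢
    have hiff : a * d ≤ x ↔ a ≤ PySem.Int.floordiv x d := (PySem.Int.le_floordiv_iff_mul_le hd).symm
    by_cases hq : a ≤ PySem.Int.floordiv x d
    · rw [if_pos (hiff.mpr hq)]
      have hcond : a ≤ min (b - 1) (PySem.Int.floordiv x d) := by omega
      rw [if_pos hcond]
      by_cases hq1 : a + 1 ≤ min (b - 1) (PySem.Int.floordiv x d)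
      · rw [if_pos hq1] at IH
        linear_combination IH
      · rw [if_neg hq1] at IH
        have hm : min (b - 1) (PySem.Int.floordiv x d) = a := by omega
        rw [hm]
        linear_combination IH
    · rw [if_neg (fun hc => hq (hiff.mp hc))]
      have hmin : min (b - 1) (PySem.Int.floordiv x d) ≤ PySem.Int.floordiv x d := min_le_right _ _
      rw [if_neg (by omega)] at IH
      rw [if_neg (by omega)]
      linear_combination IH

lemma isum_blk (d a b x : Int) (hd : 0 < d) :
    isum x (blk d a b) =
      if a ≤ min (b - 1) (PySem.Int.floordiv x d) then
        PySem.Int.floordiv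
          (d * (a + min (b - 1) (PySem.Int.floordiv x d)) *
            (min (b - 1) (PySem.Int.floordiv x d) - a + 1)) 2
      else 0 := by
  have h2 := two_mul_isum_block d x hd (b - a).toNat a b rfl
  have hself : isum x (blk d a b) = PySem.Int.floordiv (2 * isum x (blk d a b)) 2 := by
    rw [PySem.Int.floordiv_eq_ediv_of_pos (by norm_num)]
    exact (Int.mul_ediv_cancel_left _ (by norm_num)).symm
  rw [hself]
  rw [show 2 * isum x (blk d a b) =
      2 * isum x ((PySem.List.pyRange a b 1).map (fun i => i * d)) from rfl]
  rw [h2]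
  split_ifs with hc
  · rfl
  · decide

lemma pv_ite_add (c : Prop) [Decidable c] (t u : Int) :
    (if c then t + u else t) = t + (if c then u else 0) := by
  split_ifs <;> ring

lemma pvB_f_eq (x : Int) : pvB_f x = isum x pvL := by
  have b1 := isum_blk 11 1 10 x (by norm_num)
  have b2 := isum_blk 101 10 100 x (by norm_num)
  have b3 := isum_blk 1001 100 1000 x (by norm_num)
  have b4 := isum_blk 10001 1000 10000 x (by norm_num)
  have b5 := isum_blk 100001 10000 100000 x (by norm_num)
  simp only [pvB_f, List.foldl_cons, List.foldl_nil, pv_ite_add]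
  simp only [pvL, isum_append, b1, b2, b3, b4, b5]
  simp only [show (10:Int) * 1 - 1 = 9 by norm_num, show (10:Int) - 1 = 9 by norm_num,
    show (10:Int) * 10 - 1 = 99 by norm_num, show (100:Int) - 1 = 99 by norm_num,
    show (10:Int) * 100 - 1 = 999 by norm_num, show (1000:Int) - 1 = 999 by norm_num,
    show (10:Int) * 1000 - 1 = 9999 by norm_num, show (10000:Int) - 1 = 9999 by norm_num,
    show (10:Int) * 10000 - 1 = 99999 by norm_num, show (100000:Int) - 1 = 99999 by norm_num,
    zero_add]

lemma sum_filter_eq (s e : Int) (l : List Int) :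
    (l.filter (fun v => decide (s ≤ v) && decide (v ≤ e))).sum
      = (l.map (fun v => if s ≤ v ∧ v ≤ e then v else 0)).sum := by
  induction l with
  | nil => rfl
  | cons hd tl ih =>
    by_cases h1 : s ≤ hd <;> by_cases h2 : hd ≤ e <;>
      simp [h1, h2, ih]

lemma jsum_split (s e : Int) (l : List Int) (hse : s ≤ e) :
    (l.map (fun v => if s ≤ v ∧ v ≤ e then v else 0)).sum
      = isum e l - isum (s - 1) l := by
  induction l with
  | nil => simp [isum]
  | cons hd tl ih =>
    simp only [isum, List.map_cons, List.sum_cons] at ih ⊢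
    split_ifs <;> omega

lemma query_eq (s e : Int) :
    (pvL.filter (fun v => decide (s ≤ v) && decide (v ≤ e))).sum
      = if s ≤ e then pvB_f e - pvB_f (s - 1) else 0 := by
  by_cases hse : s ≤ e
  · rw [if_pos hse, sum_filter_eq, jsum_split s e pvL hse, pvB_f_eq, pvB_f_eq]
  · rw [if_neg hse, sum_filter_eq]
    apply List.sum_eq_zero
    intro y hy
    rcases List.mem_map.mp hy with ⟨v, _, rfl⟩
    rw [if_neg (by omega)]

-- ===== VERDICT (by name: the statement is the Claim_ definition above) =====
theorem star1_alt3_spec : Claim_equal_star1_alt3 := by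
  intro data hD
  clear hD
  unfold Spec_star1_alt3 star1_alt3 star1_alt3_alt
  simp only [invalid_filter_sum]
  suffices h : ∀ c : Int,
      data.foldl (fun count se =>
        count + (pvL.filter (fun v => decide (se.1 ≤ v) && decide (v ≤ se.2))).sum) c
        = data.foldl (fun count se =>
            if se.1 ≤ se.2 then count + (pvB_f se.2 - pvB_f (se.1 - 1)) else count) c by
    exact h 0
  induction data with
  | nil => intro c; rfl
  | cons hd tl ih =>
    intro c
    simp only [List.foldl_cons]
    rw [query_eq]
    split_ifs with hp
    · apply ih
    · rw [add_zero]; apply ih
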